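-- pv_equiv track=rewrite | github.com/andrewwise/last-event-scraper | get_events_artists.py | format_output_with_headings
-- ===== SOURCE A (Python) =====
-- from typing import Set, List
--
-- def format_output_with_headings(sorted_artists: List[str], ignore_the: bool = False) -> List[str]:
--     """
--     Format output with alphabetical letter headings.
--
--     Args:
--         sorted_artists: Sorted list of artist names
--         ignore_the: If True, group by letter ignoring "The" at the start
--
--     Returns:
--         List of output lines with headings
--     """
--     output_lines = []
--
--     # First, handle numbers and symbols
--     output_lines.append(f"\n=== # (Numbers & Symbols) ===")
--     numbers_symbols = []
--     for artist in sorted_artists: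
--         # Determine which character to check
--         check_char = artist[0].upper()
--         if ignore_the and artist.lower().startswith('the ') and len(artist) > 4:
--             check_char = artist[4].upper()
--
--         # If not A-Z, it's a number or symbol
--         if not check_char.isalpha():
--             numbers_symbols.append(artist)
--
--     if numbers_symbols:
--         output_lines.extend(numbers_symbols)
--     else:
--         output_lines.append("(none)")
--
--     # Go through all letters A-Z
--     for letter in 'ABCDEFGHIJKLMNOPQRSTUVWXYZ':
--         output_lines.append(f"\n=== {letter} ===")
--
--         # Find artists that start with this letter
--         artists_for_letter = []
--         for artist in sorted_artists:
--             # Determine which letter to group by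
--             group_letter = artist[0].upper()
--             if ignore_the and artist.lower().startswith('the ') and len(artist) > 4:
--                 group_letter = artist[4].upper()
--
--             if group_letter == letter:
--                 artists_for_letter.append(artist)
--
--         if artists_for_letter:
--             output_lines.extend(artists_for_letter)
--         else:
--             output_lines.append("(none)")
--
--     return output_lines
-- ===== SOURCE B (Python) =====
-- from typing import List
--
-- def format_output_with_headings(sorted_artists: List[str], ignore_the: bool = False) -> List[str]:
--     # One bucketing pass into a dict of lists, then a recursive emit over the fixed key order
--     # (instead of A's 27 repeated scans of sorted_artists).
--     def key(artist):
--         rest = artist[4:] if ignore_the and len(artist) > 4 and artist.lower().startswith('the ') else artist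
--         c = rest[0].upper()
--         return c if c.isalpha() else '#'
--
--     buckets = {}
--     for artist in sorted_artists:
--         buckets.setdefault(key(artist), []).append(artist)
--
--     def heading(k):
--         return "\n=== # (Numbers & Symbols) ===" if k == '#' else f"\n=== {k} ==="
--
--     def emit(keys):
--         if not keys:
--             return []
--         k = keys[0]
--         group = buckets.get(k, [])
--         return [heading(k)] + (group or ["(none)"]) + emit(keys[1:])
--
--     return emit('#ABCDEFGHIJKLMNOPQRSTUVWXYZ')
-- ===== Notes on version B (the rewrite author's own statement) =====
-- stated objective: faster
-- what changed: Replaces A's 27 repeated scans of sorted_artists (one per heading) with a single bucketing pass into a dict of lists keyed by the group character, followed by a recursive emit over the fixed key order '#'+A..Z.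
import Mathlib
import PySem

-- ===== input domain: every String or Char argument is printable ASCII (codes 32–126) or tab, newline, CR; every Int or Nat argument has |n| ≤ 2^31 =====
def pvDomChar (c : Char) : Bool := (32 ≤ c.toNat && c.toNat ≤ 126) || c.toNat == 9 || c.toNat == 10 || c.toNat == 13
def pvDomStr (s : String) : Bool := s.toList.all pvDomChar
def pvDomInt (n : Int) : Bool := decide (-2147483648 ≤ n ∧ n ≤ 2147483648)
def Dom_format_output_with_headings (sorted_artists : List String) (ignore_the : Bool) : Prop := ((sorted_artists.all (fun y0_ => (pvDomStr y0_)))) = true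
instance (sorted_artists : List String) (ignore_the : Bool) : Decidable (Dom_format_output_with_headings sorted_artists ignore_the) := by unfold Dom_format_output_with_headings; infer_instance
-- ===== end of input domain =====

-- B replaces A's 27 repeated scans of sorted_artists with one bucketing pass into a dict of lists plus a recursive fixed-order emit (objective: faster by a constant factor).


-- ===== PORT A =====
-- check_char / group_letter: the duplicated inline computation of A's two loop bodies
def pvCheckA (artist : String) (ignore_the : Bool) : Char :=
  let c := PySem.Chars.upperChar ((PySem.Str.pyGet? artist 0).getD ' ')
  if ignore_the && PySem.Str.startswith (PySem.Str.lower artist) "the " && decide (4 < PySem.Str.len artist) then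
    PySem.Chars.upperChar ((PySem.Str.pyGet? artist 4).getD ' ')
  else c

def pvLettersA : List Char :=
  ['A','B','C','D','E','F','G','H','I','J','K','L','M','N','O','P','Q','R','S','T','U','V','W','X','Y','Z']

def format_output_with_headings (sorted_artists : List String) (ignore_the : Bool) : List String :=
  let output_lines : List String := ["\n=== # (Numbers & Symbols) ==="]
  let numbers_symbols := sorted_artists.foldl
    (fun acc artist => if !(PySem.Chars.isalpha (pvCheckA artist ignore_the)) then acc ++ [artist] else acc) []
  let output_lines := if numbers_symbols ≠ [] then output_lines ++ numbers_symbols else output_lines ++ ["(none)"]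
  pvLettersA.foldl (fun out letter =>
    let out := out ++ ["\n=== " ++ String.mk [letter] ++ " ==="]
    let artists_for_letter := sorted_artists.foldl
      (fun acc artist => if pvCheckA artist ignore_the == letter then acc ++ [artist] else acc) []
    if artists_for_letter ≠ [] then out ++ artists_for_letter else out ++ ["(none)"]) output_lines

-- ===== PORT B =====
-- Source B's key(): strip the leading "the " by slicing when applicable, look at the first character, '#' for non-letters
def pvGroupKey (ignore_the : Bool) (artist : String) : Char :=
  let rest := if ignore_the && decide (4 < PySem.Str.len artist) && PySem.Str.startswith (PySem.Str.lower artist) "the " then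
      PySem.Str.slice artist (some 4) none
    else artist
  let c := PySem.Chars.upperChar ((PySem.Str.pyGet? rest 0).getD ' ')
  if PySem.Chars.isalpha c then c else '#'

-- Source B's heading(k)
def pvHeading (k : Char) : String :=
  if k == '#' then "\n=== # (Numbers & Symbols) ===" else "\n=== " ++ String.mk [k] ++ " ==="

-- Source B's recursive emit over the remaining keys
def pvEmit (buckets : PySem.Dict Char (List String)) : List Char → List String
  | [] => []
  | k :: rest =>
    let group := buckets.getD k []
    [pvHeading k] ++ (if group.isEmpty then ["(none)"] else group) ++ pvEmit buckets rest

def pvKeys : List Char :=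
  ['#','A','B','C','D','E','F','G','H','I','J','K','L','M','N','O','P','Q','R','S','T','U','V','W','X','Y','Z']

def format_output_with_headings_alt (sorted_artists : List String) (ignore_the : Bool) : List String :=
  let buckets : PySem.Dict Char (List String) := sorted_artists.foldl
    (fun d artist => d.modify (pvGroupKey ignore_the artist) [] (· ++ [artist])) PySem.Dict.empty
  pvEmit buckets pvKeys

-- ===== PRECONDITION & SPEC =====
-- Pre_ excludes only lists containing the empty string, on which A raises IndexError at artist[0].
def Pre_format_output_with_headings (sorted_artists : List String) (ignore_the : Bool) : Prop :=
  "" ∉ sorted_artists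
instance (sorted_artists : List String) (ignore_the : Bool) : Decidable (Pre_format_output_with_headings sorted_artists ignore_the) := by unfold Pre_format_output_with_headings; infer_instance

def pvWitness_format_output_with_headings : List String × Bool := (["2Pac", "Abba", "The Beatles"], true)

def Spec_format_output_with_headings (sorted_artists : List String) (ignore_the : Bool) (out : List String) : Prop := out = format_output_with_headings_alt sorted_artists ignore_the
instance (sorted_artists : List String) (ignore_the : Bool) (out : List String) : Decidable (Spec_format_output_with_headings sorted_artists ignore_the out) := by unfold Spec_format_output_with_headings; infer_instance

-- ===== CLAIM (what is proved, stated in full; the proofs are below) =====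
def Claim_equal_format_output_with_headings : Prop := ∀ (sorted_artists : List String) (ignore_the : Bool), Dom_format_output_with_headings sorted_artists ignore_the → Pre_format_output_with_headings sorted_artists ignore_the → Spec_format_output_with_headings sorted_artists ignore_the (format_output_with_headings sorted_artists ignore_the)

-- ===== LEMMAS AND PROOFS =====
-- B's key computation coincides with ('#'-defaulted) A's check character
theorem pvGroupKey_eq (artist : String) (ignore_the : Bool) :
    pvGroupKey ignore_the artist =
      if PySem.Chars.isalpha (pvCheckA artist ignore_the) then pvCheckA artist ignore_the else '#' := by
  unfold pvGroupKey pvCheckA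
  rw [Bool.and_right_comm ignore_the (decide (4 < PySem.Str.len artist))
    (PySem.Str.startswith (PySem.Str.lower artist) "the ")]
  by_cases h : (ignore_the && PySem.Str.startswith (PySem.Str.lower artist) "the "
      && decide (4 < PySem.Str.len artist)) = true
  · have hget : PySem.Str.pyGet? (PySem.Str.slice artist (some 4) none) 0 =
        PySem.Str.pyGet? artist 4 := by
      have hs := PySem.List.slice_from_natCast artist.toList 4
      rw [show (0:Int) = ((0:Nat):Int) from rfl, show (4:Int) = ((4:Nat):Int) from rfl,
        PySem.Str.pyGet?_natCast, PySem.Str.pyGet?_natCast]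
      simp only [PySem.Str.slice, PySem.Chars.slice, String.toList_ofList]
      rw [hs]
      simp
    simp only [h, if_true, hget]
  · simp only [h, if_false, Bool.false_eq_true]

theorem pvKey_hash (artist : String) (ignore_the : Bool) :
    (pvGroupKey ignore_the artist == '#') = !(PySem.Chars.isalpha (pvCheckA artist ignore_the)) := by
  rw [pvGroupKey_eq]
  by_cases h : PySem.Chars.isalpha (pvCheckA artist ignore_the)
  · have hne : pvCheckA artist ignore_the ≠ '#' := by
      intro he; rw [he] at h; exact absurd h (by decide)
    simp [h, hne]
  · simp [h]

theorem pvKey_letter (artist : String) (ignore_the : Bool) (L : Char)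
    (hL : PySem.Chars.isalpha L = true) :
    (pvGroupKey ignore_the artist == L) = (pvCheckA artist ignore_the == L) := by
  rw [pvGroupKey_eq]
  by_cases h : PySem.Chars.isalpha (pvCheckA artist ignore_the)
  · simp [h]
  · have h1 : '#' ≠ L := by
      intro he; rw [← he] at hL; exact absurd hL (by decide)
    have h2 : pvCheckA artist ignore_the ≠ L := by
      intro he; rw [he, hL] at h; exact h rfl
    simp [h, h1, h2]

-- B's buckets characterised: bucket c is the subsequence of artists whose key is c
theorem pvBucket_eq (l : List String) (ignore_the : Bool) (c : Char) :
    (l.foldl (fun d artist => d.modify (pvGroupKey ignore_the artist) [] (· ++ [artist]))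
        (PySem.Dict.empty : PySem.Dict Char (List String))).getD c [] =
      l.filter (fun artist => pvGroupKey ignore_the artist == c) := by
  have h := PySem.Dict.getD_foldl_modify_append
      (l.map (fun a => (pvGroupKey ignore_the a, a)))
      (PySem.Dict.empty : PySem.Dict Char (List String)) c
  rw [List.foldl_map] at h
  simp only [h, PySem.Dict.getD_empty, List.nil_append]
  rw [List.filter_map]
  simp [List.map_map, Function.comp_def]

-- B's recursive emit is a flatMap over the key list
theorem pvEmit_flatMap (buckets : PySem.Dict Char (List String)) (ks : List Char) :
    pvEmit buckets ks = ks.flatMap (fun k =>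
      [pvHeading k] ++ (if (buckets.getD k []).isEmpty then ["(none)"] else buckets.getD k [])) := by
  induction ks with
  | nil => rfl
  | cons k rest ih => simp [pvEmit, ih]

-- Python's 'group or ["(none)"]' written the other way round
theorem pvOrNone (g : List String) :
    (if g.isEmpty then ["(none)"] else g) = (if g ≠ [] then g else ["(none)"]) := by
  cases g <;> simp

-- a segment-emitting step: pull the heading out of the if
theorem pvIte_append (c : Prop) [Decidable c] (h f n : List String) :
    (if c then h ++ f else h ++ n) = h ++ (if c then f else n) := by
  split <;> rfl

set_option maxHeartbeats 1000000 in
set_option maxRecDepth 8192 in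
theorem format_output_spec_aux (sorted_artists : List String) (ignore_the : Bool) :
    format_output_with_headings sorted_artists ignore_the =
      format_output_with_headings_alt sorted_artists ignore_the := by
  unfold format_output_with_headings format_output_with_headings_alt
  have hnum := PySem.List.foldl_append_if_eq_filter
      (p := fun artist => !(PySem.Chars.isalpha (pvCheckA artist ignore_the)))
      (l := sorted_artists) (acc := ([] : List String))
  simp only [hnum, List.nil_append]
  -- rewrite A's emit loop into flatMap form
  have hA : ∀ (init : List String),
      pvLettersA.foldl (fun out letter =>
        let out := out ++ ["\n=== " ++ String.mk [letter] ++ " ==="]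
        let afl := sorted_artists.foldl
          (fun acc artist => if pvCheckA artist ignore_the == letter then acc ++ [artist] else acc) []
        if afl ≠ [] then out ++ afl else out ++ ["(none)"]) init =
      init ++ pvLettersA.flatMap (fun letter =>
        ["\n=== " ++ String.mk [letter] ++ " ==="] ++
        (if sorted_artists.filter (fun artist => pvCheckA artist ignore_the == letter) ≠ [] then
          sorted_artists.filter (fun artist => pvCheckA artist ignore_the == letter) else ["(none)"])) := by
    intro init
    refine Eq.trans (PySem.List.foldl_congr_mem' _ _ _ _ ?_)
      (PySem.List.foldl_append_eq_flatMap _ _ _)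
    intro letter _ out
    simp only [PySem.List.foldl_append_if_eq_filter, List.nil_append]
    rw [← List.append_assoc, pvIte_append]
  rw [hA]
  -- rewrite B's recursive emit into flatMap form over the same filters
  have hB : pvEmit (sorted_artists.foldl
        (fun d artist => d.modify (pvGroupKey ignore_the artist) [] (· ++ [artist]))
        (PySem.Dict.empty : PySem.Dict Char (List String))) pvKeys =
      pvKeys.flatMap (fun k =>
        [pvHeading k] ++
        (if sorted_artists.filter (fun artist => pvGroupKey ignore_the artist == k) ≠ [] then
          sorted_artists.filter (fun artist => pvGroupKey ignore_the artist == k) else ["(none)"])) := by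
    rw [pvEmit_flatMap]
    apply List.flatMap_congr
    intro k _
    rw [pvBucket_eq, pvOrNone]
  rw [hB]
  -- split off the '#' slot of B's key list
  have hsplit : pvKeys = '#' :: pvLettersA := rfl
  rw [hsplit, List.flatMap_cons]
  -- '#' segment agrees with A's numbers&symbols block
  have hhash : sorted_artists.filter (fun artist => pvGroupKey ignore_the artist == '#') =
      sorted_artists.filter (fun artist => !(PySem.Chars.isalpha (pvCheckA artist ignore_the))) :=
    List.filter_congr (fun a _ => pvKey_hash a ignore_the)
  -- letter segments agree
  have hletters : pvLettersA.flatMap (fun k =>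
        [pvHeading k] ++
        (if sorted_artists.filter (fun artist => pvGroupKey ignore_the artist == k) ≠ [] then
          sorted_artists.filter (fun artist => pvGroupKey ignore_the artist == k) else ["(none)"])) =
      pvLettersA.flatMap (fun letter =>
        ["\n=== " ++ String.mk [letter] ++ " ==="] ++
        (if sorted_artists.filter (fun artist => pvCheckA artist ignore_the == letter) ≠ [] then
          sorted_artists.filter (fun artist => pvCheckA artist ignore_the == letter) else ["(none)"])) := by
    apply List.flatMap_congr
    intro L hL
    have hall : ∀ M ∈ pvLettersA, PySem.Chars.isalpha M = true ∧ (M == '#') = false := by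
      simp only [pvLettersA, List.mem_cons, List.not_mem_nil, or_false]
      rintro M h
      rcases h with h|h|h|h|h|h|h|h|h|h|h|h|h|h|h|h|h|h|h|h|h|h|h|h|h|h <;> subst h <;>
        exact ⟨by decide, by decide⟩
    have halpha : PySem.Chars.isalpha L = true := (hall L hL).1
    have hhd : (L == '#') = false := (hall L hL).2
    have hfil : sorted_artists.filter (fun artist => pvGroupKey ignore_the artist == L) =
        sorted_artists.filter (fun artist => pvCheckA artist ignore_the == L) :=
      List.filter_congr (fun a _ => pvKey_letter a ignore_the L halpha)
    rw [hfil]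
    unfold pvHeading
    rw [hhd]
    simp only [Bool.false_eq_true, if_false]
  rw [hletters, hhash]
  have hhd0 : pvHeading '#' = "\n=== # (Numbers & Symbols) ===" := rfl
  rw [hhd0, pvIte_append, List.append_assoc]

-- ===== VERDICT (by name: the statement is the Claim_ definition above) =====
theorem format_output_with_headings_spec : Claim_equal_format_output_with_headings := by
  intro sorted_artists ignore_the _ _
  unfold Spec_format_output_with_headings
  exact format_output_spec_aux sorted_artists ignore_the
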